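-- pv_equiv track=rewrite | github.com/szymonkujawski/pp1 | 04-Subroutines/36.py | f
-- ===== SOURCE A (Python) =====
-- def f(detector):
--     count = 0
--     three = False
--     for i in range(0,len(detector)):
--         sign = detector[i]
--         if sign=="+":
--             count += 1
--         else:
--             count -= 1
--         if count==3:
--             three = True
--     return three
-- ===== SOURCE B (Python) =====
-- def f(detector):
--     total = 0
--     prefixes = []
--     for ch in detector:
--         total += 1 if ch == "+" else -1
--         prefixes.append(total)
--     return max(prefixes, default=0) >= 3
-- ===== Notes on version B (the rewrite author's own statement) =====
-- stated objective: alternative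
-- what changed: Replaces the fused equality-flag loop (ever count==3) by a two-phase table decomposition: build the prefix-sum table, then test max(prefixes, default=0) >= 3, correct because the count moves by +/-1 so it can only exceed 3 by landing on 3.
import Mathlib
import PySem

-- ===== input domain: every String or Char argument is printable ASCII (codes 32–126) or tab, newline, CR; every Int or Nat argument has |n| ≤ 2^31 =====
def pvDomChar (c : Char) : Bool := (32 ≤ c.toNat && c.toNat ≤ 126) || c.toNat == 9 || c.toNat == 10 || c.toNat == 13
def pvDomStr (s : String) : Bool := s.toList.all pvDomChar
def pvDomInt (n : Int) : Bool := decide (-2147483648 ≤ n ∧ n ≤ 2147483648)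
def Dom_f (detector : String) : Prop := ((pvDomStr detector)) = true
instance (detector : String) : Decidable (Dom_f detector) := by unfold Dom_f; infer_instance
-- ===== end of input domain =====

-- B replaces A's fused "flag when count == 3" loop by a two-phase decomposition:
-- build the prefix-sum table, then test max(prefixes, default=0) >= 3 (valid since steps are ±1).

-- ===== PORT A =====
def f (detector : String) : Bool :=
  let cs := detector.toList
  let st := (PySem.List.pyRange 0 (cs.length : Int) 1).foldl
    (fun (st : Int × Bool) i =>
      let sign := PySem.List.pyGetD cs i ' '
      let count := if sign = '+' then st.1 + 1 else st.1 - 1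
      (count, if count = 3 then true else st.2))
    (0, false)
  st.2

-- ===== PORT B =====
-- prefix-sum table: the loop "total += 1 if ch == '+' else -1; prefixes.append(total)"
def bPrefixes : Int → List Char → List Int
  | _, [] => []
  | total, ch :: t =>
    let total' := total + (if ch = '+' then 1 else -1)
    total' :: bPrefixes total' t

def f_alt (detector : String) : Bool :=
  let prefixes := bPrefixes 0 detector.toList
  decide (3 ≤ (PySem.List.max? prefixes (fun x => x)).getD 0)

-- ===== PRECONDITION & SPEC =====
def Spec_f (detector : String) (out : Bool) : Prop := out = f_alt detector
instance (detector : String) (out : Bool) : Decidable (Spec_f detector out) := by unfold Spec_f; infer_instance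

-- ===== CLAIM (what is proved, stated in full; the proofs are below) =====
def Claim_equal_f : Prop := ∀ (detector : String), Dom_f detector → Spec_f detector (f detector)

-- ===== LEMMAS AND PROOFS =====

-- A's fused loop returns "three was already set, or 3 occurs among the prefix sums".
theorem aLoop_eq (l : List Char) : ∀ (c : Int) (b : Bool),
    (l.foldl
      (fun (st : Int × Bool) sign =>
        (if sign = '+' then st.1 + 1 else st.1 - 1,
         if (if sign = '+' then st.1 + 1 else st.1 - 1) = 3 then true else st.2))
      (c, b)).2
    = (b || decide (3 ∈ bPrefixes c l)) := by
  induction l with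
  | nil => intro c b; simp [bPrefixes]
  | cons ch t ih =>
    intro c b
    simp only [List.foldl_cons, bPrefixes, List.mem_cons]
    rw [ih]
    have he : c + (if ch = '+' then 1 else -1) = (if ch = '+' then c + 1 else c - 1) := by
      split_ifs <;> ring
    by_cases h3 : (if ch = '+' then c + 1 else c - 1) = 3
    · simp [h3, he]
    · simp [h3, he, eq_comm]

-- Intermediate value: ±1 steps from below 3 cannot reach ≥ 3 without landing on 3.
theorem ivt (l : List Char) : ∀ (c : Int), c < 3 →
    ∀ x ∈ bPrefixes c l, 3 ≤ x → 3 ∈ bPrefixes c l := by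
  induction l with
  | nil => intro c _ x hx; simp [bPrefixes] at hx
  | cons ch t ih =>
    intro c hc x hx h3
    simp only [bPrefixes, List.mem_cons] at hx ⊢
    by_cases hc' : c + (if ch = '+' then 1 else -1) = 3
    · exact Or.inl hc'.symm
    · rcases hx with rfl | hx
      · exfalso; split_ifs at h3 hc' <;> omega
      · exact Or.inr (ih _ (by split_ifs at hc' ⊢ <;> omega) x hx h3)

theorem mem_iff_max (l : List Int) (h : ∀ x ∈ l, 3 ≤ x → 3 ∈ l) :
    (3 ∈ l) ↔ 3 ≤ (PySem.List.max? l (fun x => x)).getD 0 := by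
  constructor
  · intro h3
    cases hq : PySem.List.max? l (fun x => x) with
    | none =>
      exact absurd ((PySem.List.max?_eq_none_iff _ _).mp hq) (by rintro rfl; simp at h3)
    | some m =>
      simp only [Option.getD_some]
      simpa using PySem.List.max?_isMax hq 3 h3
  · intro hm
    cases hq : PySem.List.max? l (fun x => x) with
    | none => rw [hq] at hm; norm_num at hm
    | some m =>
      rw [hq] at hm
      exact h m (PySem.List.max?_mem hq) (by simpa using hm)

-- ===== VERDICT (by name: the statement is the Claim_ definition above) =====
theorem f_spec : Claim_equal_f := by
  intro detector _
  unfold Spec_f f f_alt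
  simp only []
  rw [PySem.List.foldl_pyRange_zero_pyGetD' detector.toList ' '
    (fun (st : Int × Bool) sign =>
      (if sign = '+' then st.1 + 1 else st.1 - 1,
       if (if sign = '+' then st.1 + 1 else st.1 - 1) = 3 then true else st.2)) (0, false)]
  rw [aLoop_eq]
  rw [Bool.false_or]
  have := mem_iff_max (bPrefixes 0 detector.toList) (ivt detector.toList 0 (by omega))
  by_cases h : 3 ∈ bPrefixes 0 detector.toList <;> simp_all
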